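-- pv_equiv track=rewrite | github.com/ToVinhKhang/Algorithm-Analysis-Techniques | AlgorithmAnalysisTechniques/BranchAndBound/TravelingSalesman.py | findSecondMinimumEdgeCost
-- ===== SOURCE A (Python) =====
-- infinity = 99999999999999999
--
-- def findSecondMinimumEdgeCost(adjacencyMatrix, i):
--     firstCost, secondCost = infinity, infinity
--
--     for j in range(N):
--         if i == j:
--             continue
--
--         if adjacencyMatrix[i][j] <= firstCost:
--             secondCost = firstCost
--             firstCost = adjacencyMatrix[i][j]
--
--         elif(adjacencyMatrix[i][j] != firstCost and adjacencyMatrix[i][j] <= secondCost):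
--             secondCost = adjacencyMatrix[i][j]
--
--     return secondCost
--
-- N = 5
-- ===== SOURCE B (Python) =====
-- infinity = 99999999999999999
-- N = 5
--
-- def findSecondMinimumEdgeCost(adjacencyMatrix, i):
--     costs = sorted(adjacencyMatrix[i][j] for j in range(N) if j != i)
--     return costs[1] if len(costs) >= 2 else infinity
-- ===== Notes on version B (the rewrite author's own statement) =====
-- stated objective: simpler
-- what changed: Replaces the two-variable single-pass min/second-min tracking with collecting the off-diagonal row entries, sorting them, and returning the second element (infinity sentinel if fewer than two).
import Mathlib
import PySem

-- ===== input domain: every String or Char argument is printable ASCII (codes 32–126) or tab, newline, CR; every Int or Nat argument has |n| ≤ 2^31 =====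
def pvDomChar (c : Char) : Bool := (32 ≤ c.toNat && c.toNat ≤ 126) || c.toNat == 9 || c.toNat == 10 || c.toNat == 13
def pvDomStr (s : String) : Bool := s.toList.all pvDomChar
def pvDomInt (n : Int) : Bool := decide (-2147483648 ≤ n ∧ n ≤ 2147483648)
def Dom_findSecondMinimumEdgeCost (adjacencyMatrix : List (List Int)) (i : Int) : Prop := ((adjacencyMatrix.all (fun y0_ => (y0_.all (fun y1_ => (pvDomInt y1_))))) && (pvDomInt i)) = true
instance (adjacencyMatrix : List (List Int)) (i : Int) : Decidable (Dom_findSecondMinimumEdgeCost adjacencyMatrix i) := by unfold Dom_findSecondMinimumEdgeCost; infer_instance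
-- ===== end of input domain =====

-- B replaces A's two-variable single-pass min/second-min tracking by sorting the
-- off-diagonal row entries and returning the second one (simpler; not faster).

-- shared helper: the expression adjacencyMatrix[i][j] (the .getD 0 default is
-- unreachable on inputs admitted by Pre_, where both lookups succeed)
def pvEntry (adjacencyMatrix : List (List Int)) (i : Int) (j : Nat) : Int :=
  ((PySem.List.pyGet? adjacencyMatrix i).bind (fun row => PySem.List.pyGet? row (j : Int))).getD 0

-- ===== PORT A =====
-- loop body of A's 'for j in range(N)' with state (firstCost, secondCost)
def pvLoopA (adjacencyMatrix : List (List Int)) (i : Int) (st : Int × Int) (j : Nat) : Int × Int :=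
  if i = (j : Int) then st
  else
    let v := pvEntry adjacencyMatrix i j
    if v ≤ st.1 then (v, st.1)
    else if v ≠ st.1 ∧ v ≤ st.2 then (st.1, v)
    else st

def findSecondMinimumEdgeCost (adjacencyMatrix : List (List Int)) (i : Int) : Int :=
  ((List.range 5).foldl (pvLoopA adjacencyMatrix i) (99999999999999999, 99999999999999999)).2

-- ===== PORT B =====
def findSecondMinimumEdgeCost_alt (adjacencyMatrix : List (List Int)) (i : Int) : Int :=
  let costs := PySem.List.sorted
    (((List.range 5).filter (fun (j : Nat) => decide ((j : Int) ≠ i))).map (pvEntry adjacencyMatrix i))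
    (fun x => x) false
  if 2 ≤ costs.length then (PySem.List.pyGet? costs 1).getD 0 else 99999999999999999

-- ===== PRECONDITION & SPEC =====
-- Pre_ excludes exactly the inputs where Python A raises IndexError: some access
-- adjacencyMatrix[i][j] (j in range(5), j ≠ i) is out of range.
def Pre_findSecondMinimumEdgeCost (adjacencyMatrix : List (List Int)) (i : Int) : Prop :=
  ∀ j ∈ List.range 5, (j : Int) ≠ i →
    ((PySem.List.pyGet? adjacencyMatrix i).bind (fun row => PySem.List.pyGet? row (j : Int))).isSome = true

instance (adjacencyMatrix : List (List Int)) (i : Int) : Decidable (Pre_findSecondMinimumEdgeCost adjacencyMatrix i) := by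
  unfold Pre_findSecondMinimumEdgeCost; infer_instance

def pvWitness_findSecondMinimumEdgeCost : List (List Int) × Int :=
  ([[0, 1, 2, 3, 4], [1, 0, 1, 1, 1], [2, 2, 0, 2, 2], [3, 3, 3, 0, 3], [4, 4, 4, 4, 0]], 0)

def Spec_findSecondMinimumEdgeCost (adjacencyMatrix : List (List Int)) (i : Int) (out : Int) : Prop :=
  out = findSecondMinimumEdgeCost_alt adjacencyMatrix i
instance (adjacencyMatrix : List (List Int)) (i : Int) (out : Int) : Decidable (Spec_findSecondMinimumEdgeCost adjacencyMatrix i out) := by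
  unfold Spec_findSecondMinimumEdgeCost; infer_instance

-- ===== CLAIM (what is proved, stated in full; the proofs are below) =====
def Claim_equal_findSecondMinimumEdgeCost : Prop := ∀ (adjacencyMatrix : List (List Int)) (i : Int), Dom_findSecondMinimumEdgeCost adjacencyMatrix i → Pre_findSecondMinimumEdgeCost adjacencyMatrix i → Spec_findSecondMinimumEdgeCost adjacencyMatrix i (findSecondMinimumEdgeCost adjacencyMatrix i)

-- ===== LEMMAS AND PROOFS =====

-- A's loop body with the j = i test stripped out
def pvStep (st : Int × Int) (v : Int) : Int × Int :=
  if v ≤ st.1 then (v, st.1)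
  else if v ≠ st.1 ∧ v ≤ st.2 then (st.1, v)
  else st

-- stable insertion of sorted(..) specialised to the identity key
def pvIns (v : Int) (acc : List Int) : List Int :=
  PySem.List.insertBy (fun a b => decide (a < b)) v acc

-- A's fold over range(5) with the skip equals pvStep folded over the filtered/mapped values
theorem pvLoopA_eq_filter_fold (l : List Nat) (m : List (List Int)) (i : Int) (st : Int × Int) :
    l.foldl (pvLoopA m i) st
      = ((l.filter (fun (j : Nat) => decide ((j : Int) ≠ i))).map (pvEntry m i)).foldl pvStep st := by
  induction l generalizing st with
  | nil => rfl
  | cons j l ih =>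
    rw [List.foldl_cons, List.filter_cons]
    by_cases h : i = (j : Int)
    · rw [show (decide ((j : Int) ≠ i)) = false by simp [h]]
      simp only [Bool.false_eq_true, if_false]
      rw [show pvLoopA m i st j = st from by simp [pvLoopA, h]]
      exact ih st
    · rw [show (decide ((j : Int) ≠ i)) = true by simp [Ne.symm h]]
      simp only [if_true, List.map_cons, List.foldl_cons]
      rw [show pvLoopA m i st j = pvStep st (pvEntry m i j) from by
        simp only [pvLoopA, pvStep, if_neg h]]
      exact ih _

theorem pvStep_insert (acc : List Int) (v : Int)
    (hs : acc.Pairwise (· ≤ ·)) (hv : v < 99999999999999999) :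
    pvStep ((acc[0]?).getD 99999999999999999, (acc[1]?).getD 99999999999999999) v
      = (((pvIns v acc)[0]?).getD 99999999999999999, ((pvIns v acc)[1]?).getD 99999999999999999) := by
  match acc with
  | [] =>
    simp [pvStep, pvIns, PySem.List.insertBy]
    omega
  | [x] =>
    simp only [pvStep, pvIns, PySem.List.insertBy]
    split_ifs <;> simp_all <;> omega
  | x :: y :: t =>
    have hxy : x ≤ y := by
      rcases List.pairwise_cons.mp hs with ⟨h1, _⟩
      exact h1 y (by simp)
    simp only [pvStep, pvIns, PySem.List.insertBy]
    split_ifs <;> simp_all <;> omega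

theorem pvIns_pairwise (v : Int) (acc : List Int) (hs : acc.Pairwise (· ≤ ·)) :
    (pvIns v acc).Pairwise (· ≤ ·) := by
  induction acc with
  | nil => simp [pvIns, PySem.List.insertBy]
  | cons x xs ih =>
    rcases List.pairwise_cons.mp hs with ⟨hx, hxs⟩
    by_cases h : v < x
    · have he : pvIns v (x :: xs) = v :: x :: xs := by
        simp [pvIns, PySem.List.insertBy, h]
      rw [he]
      refine List.pairwise_cons.mpr ⟨?_, hs⟩
      intro y hy
      rcases List.mem_cons.mp hy with rfl | hy
      · omega
      · exact le_trans (le_of_lt h) (hx y hy)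
    · have he : pvIns v (x :: xs) = x :: pvIns v xs := by
        simp [pvIns, PySem.List.insertBy, h]
      rw [he]
      refine List.pairwise_cons.mpr ⟨?_, ih hxs⟩
      intro y hy
      rcases (PySem.List.mem_insertBy _ v y xs).mp hy with rfl | hy2
      · omega
      · exact hx y hy2

theorem pvFold_invariant (vs acc : List Int)
    (hs : acc.Pairwise (· ≤ ·)) (hb : ∀ v ∈ vs, v < 99999999999999999) :
    vs.foldl pvStep ((acc[0]?).getD 99999999999999999, (acc[1]?).getD 99999999999999999)
      = (((vs.foldl (fun ac x => pvIns x ac) acc)[0]?).getD 99999999999999999,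
         ((vs.foldl (fun ac x => pvIns x ac) acc)[1]?).getD 99999999999999999) := by
  induction vs generalizing acc with
  | nil => rfl
  | cons v vs ih =>
    have hv : v < 99999999999999999 := hb v (by simp)
    simp only [List.foldl_cons]
    rw [pvStep_insert acc v hs hv]
    exact ih (pvIns v acc) (pvIns_pairwise v acc hs) (fun x hx => hb x (by simp [hx]))

theorem pvEntry_lt (m : List (List Int)) (i : Int) (j : Nat)
    (hdom : Dom_findSecondMinimumEdgeCost m i) :
    pvEntry m i j < 99999999999999999 := by
  unfold pvEntry
  cases hrow : PySem.List.pyGet? m i with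
  | none => simp
  | some row =>
    rw [Option.bind_some]
    cases hv : PySem.List.pyGet? row (j : Int) with
    | none => simp
    | some v =>
      rw [Option.getD_some]
      have hrm : row ∈ m := PySem.List.mem_of_pyGet?_eq_some m hrow
      have hvm : v ∈ row := PySem.List.mem_of_pyGet?_eq_some row hv
      unfold Dom_findSecondMinimumEdgeCost at hdom
      simp only [Bool.and_eq_true, List.all_eq_true] at hdom
      have := hdom.1 row hrm v hvm
      unfold pvDomInt at this
      simp only [decide_eq_true_eq] at this
      omega

theorem pvFilter_range_len (i : Int) :
    2 ≤ ((List.range 5).filter (fun (j : Nat) => decide ((j : Int) ≠ i))).length := by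
  by_cases h0 : i = 0
  · subst h0; decide
  by_cases h1 : i = 1
  · subst h1; decide
  by_cases h2 : i = 2
  · subst h2; decide
  by_cases h3 : i = 3
  · subst h3; decide
  by_cases h4 : i = 4
  · subst h4; decide
  have heq : (List.range 5).filter (fun (j : Nat) => decide ((j : Int) ≠ i)) = List.range 5 := by
    apply List.filter_eq_self.mpr
    intro j hj
    simp only [List.mem_range] at hj
    simp only [decide_eq_true_eq]
    omega
  rw [heq]
  decide

-- ===== VERDICT (by name: the statement is the Claim_ definition above) =====
theorem findSecondMinimumEdgeCost_spec : Claim_equal_findSecondMinimumEdgeCost := by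
  intro m i hdom hpre
  unfold Spec_findSecondMinimumEdgeCost findSecondMinimumEdgeCost findSecondMinimumEdgeCost_alt
  set vs := ((List.range 5).filter (fun (j : Nat) => decide ((j : Int) ≠ i))).map (pvEntry m i) with hvs
  have hb : ∀ v ∈ vs, v < 99999999999999999 := by
    intro v hv
    rcases List.mem_map.mp hv with ⟨j, _, rfl⟩
    exact pvEntry_lt m i j hdom
  rw [pvLoopA_eq_filter_fold]
  have hsorted : vs.foldl (fun ac x => pvIns x ac) [] = PySem.List.sorted vs (fun x => x) false := by
    rw [PySem.List.sorted_eq_foldl_insertBy]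
    rfl
  have hinv := pvFold_invariant vs [] (by simp) hb
  simp only [List.getElem?_nil, Option.getD_none] at hinv
  rw [← hvs, hinv, hsorted]
  have hlen : 2 ≤ (PySem.List.sorted vs (fun x => x) false).length := by
    rw [PySem.List.length_sorted, hvs, List.length_map]
    exact pvFilter_range_len i
  rw [if_pos hlen]
  have h1 : (1 : Nat) < (PySem.List.sorted vs (fun x => x) false).length := by omega
  have hsome : (PySem.List.sorted vs (fun x => x) false)[1]? = some (PySem.List.sorted vs (fun x => x) false)[1] :=
    List.getElem?_eq_getElem h1
  rw [PySem.List.pyGet?_of_nonneg _ (by norm_num)]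
  norm_num [hsome]
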